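-- pv_equiv track=rewrite | github.com/nfiresto/LetterBoxed-Solver | LetterBoxedSolver.py | InARow
-- ===== SOURCE A (Python) =====
-- def InARow(wordlist, box):
--     pairs = []
--     for word1 in wordlist:
--         for word2 in wordlist:
--             if word1 == word2:
--                 "cool"
--             elif word1[0] == word2[-1]:
--                 pairs.append([word2, word1])
--     return pairs
-- ===== SOURCE B (Python) =====
-- def InARow(wordlist, box):
--     buckets = {}
--     for w in wordlist:
--         buckets.setdefault(w[-1:], []).append(w)
--     pairs = []
--     for word1 in wordlist:
--         for word2 in buckets.get(word1[:1], []):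
--             if word2 != word1:
--                 pairs.append([word2, word1])
--     return pairs
-- ===== Notes on version B (the rewrite author's own statement) =====
-- stated objective: faster
-- what changed: B builds a dict grouping the words by their last character (as a one-character slice) in one pass and, for each word1, scans only the bucket of word1's first character, replacing A's all-pairs double scan; output order is preserved.
import Mathlib
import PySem

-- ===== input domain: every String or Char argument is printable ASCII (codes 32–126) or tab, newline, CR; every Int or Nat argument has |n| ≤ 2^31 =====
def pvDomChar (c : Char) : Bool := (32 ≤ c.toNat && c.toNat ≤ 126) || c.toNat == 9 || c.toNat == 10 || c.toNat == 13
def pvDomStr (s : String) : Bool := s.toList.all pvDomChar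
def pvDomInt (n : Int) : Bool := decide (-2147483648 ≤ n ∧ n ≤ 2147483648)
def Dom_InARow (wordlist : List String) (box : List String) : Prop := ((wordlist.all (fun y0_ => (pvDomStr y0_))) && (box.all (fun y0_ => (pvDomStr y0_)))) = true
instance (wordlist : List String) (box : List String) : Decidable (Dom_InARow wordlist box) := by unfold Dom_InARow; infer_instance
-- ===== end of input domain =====

-- B groups the words by last character (a one-character slice) once and, for each word1, scans
-- only the bucket of word1's first character instead of A's all-pairs double loop.

-- ===== PORT A =====
def InARow (wordlist : List String) (box : List String) : List (List String) :=
  wordlist.foldl (fun pairs word1 =>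
    wordlist.foldl (fun pairs word2 =>
      if word1 = word2 then pairs
      else if PySem.Str.pyGet? word1 0 = PySem.Str.pyGet? word2 (-1) then pairs ++ [[word2, word1]]
      else pairs) pairs) []

-- ===== PORT B =====
def InARow_alt (wordlist : List String) (box : List String) : List (List String) :=
  let buckets : PySem.Dict String (List String) :=
    wordlist.foldl (fun d w => d.modify (PySem.Str.slice w (some (-1)) none) [] (· ++ [w])) PySem.Dict.empty
  wordlist.foldl (fun pairs word1 =>
    (buckets.getD (PySem.Str.slice word1 none (some 1)) []).foldl (fun pairs word2 =>
      if word2 ≠ word1 then pairs ++ [[word2, word1]] else pairs) pairs) []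

-- ===== PRECONDITION & SPEC =====
-- Pre_ excludes exactly the inputs on which the Python A raises: wordlists that contain the
-- empty string together with some different word (there word1[0] / word2[-1] raises IndexError).
def Pre_InARow (wordlist : List String) (box : List String) : Prop :=
  ¬ ("" ∈ wordlist ∧ ∃ w ∈ wordlist, w ≠ "")
instance (wordlist : List String) (box : List String) : Decidable (Pre_InARow wordlist box) := by unfold Pre_InARow; infer_instance
def pvWitness_InARow : List String × List String := (["ab", "ba", "ac"], ["a", "b", "c"])
def Spec_InARow (wordlist : List String) (box : List String) (out : List (List String)) : Prop := out = InARow_alt wordlist box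
instance (wordlist : List String) (box : List String) (out : List (List String)) : Decidable (Spec_InARow wordlist box out) := by unfold Spec_InARow; infer_instance

-- ===== CLAIM (what is proved, stated in full; the proofs are below) =====
def Claim_equal_InARow : Prop := ∀ (wordlist : List String) (box : List String), Dom_InARow wordlist box → Pre_InARow wordlist box → Spec_InARow wordlist box (InARow wordlist box)

-- ===== LEMMAS AND PROOFS =====

-- A's inner loop over the whole wordlist, as a filter-then-map
theorem innerA_eq (wordlist : List String) (word1 : String) (acc : List (List String)) :
    wordlist.foldl (fun pairs word2 =>
      if word1 = word2 then pairs
      else if PySem.Str.pyGet? word1 0 = PySem.Str.pyGet? word2 (-1) then pairs ++ [[word2, word1]]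
      else pairs) acc
    = acc ++ (wordlist.filter (fun word2 =>
        !(word1 == word2) && (PySem.Str.pyGet? word1 0 == PySem.Str.pyGet? word2 (-1)))).map
        (fun word2 => [word2, word1]) := by
  rw [← PySem.List.foldl_append_if
        (fun word2 => !(word1 == word2) && (PySem.Str.pyGet? word1 0 == PySem.Str.pyGet? word2 (-1)))
        (fun word2 => [word2, word1]) wordlist acc]
  congr 1
  funext pairs word2
  by_cases h1 : word1 = word2
  · simp [h1]
  · by_cases h2 : PySem.Str.pyGet? word1 0 = PySem.Str.pyGet? word2 (-1)
    · simp [h1]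
    · simp [h1, h2]

-- the bucket for key c holds exactly the words whose last-char slice is c, in list order
theorem bucket_eq (wordlist : List String) (c : String) :
    (wordlist.foldl (fun d w => d.modify (PySem.Str.slice w (some (-1)) none) [] (· ++ [w]))
      (PySem.Dict.empty : PySem.Dict String (List String))).getD c []
    = wordlist.filter (fun w => PySem.Str.slice w (some (-1)) none == c) := by
  have h := PySem.Dict.getD_foldl_modify_append
    (wordlist.map (fun w => (PySem.Str.slice w (some (-1)) none, w)))
    (PySem.Dict.empty : PySem.Dict String (List String)) c
  rw [List.foldl_map] at h
  rw [h]
  simp [List.filter_map, Function.comp_def]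

-- B's inner loop over a bucket, as a filter-then-map
theorem innerB_eq (bucket : List String) (word1 : String) (acc : List (List String)) :
    bucket.foldl (fun pairs word2 =>
      if word2 ≠ word1 then pairs ++ [[word2, word1]] else pairs) acc
    = acc ++ (bucket.filter (fun word2 => !(word2 == word1))).map (fun word2 => [word2, word1]) := by
  rw [← PySem.List.foldl_append_if (fun word2 => !(word2 == word1))
        (fun word2 => [word2, word1]) bucket acc]
  congr 1
  funext pairs word2
  by_cases h : word2 = word1 <;> simp [h]

-- word1[:1] == word2[-1:] as strings iff word1[0] == word2[-1] as optional chars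
theorem slice_key_iff (w1 w2 : String) :
    (PySem.Str.slice w1 none (some 1) = PySem.Str.slice w2 (some (-1)) none)
      ↔ (PySem.Str.pyGet? w1 0 = PySem.Str.pyGet? w2 (-1)) := by
  have h1 : (PySem.Str.slice w1 none (some 1)).toList = w1.toList.take 1 := by
    simp [PySem.List.slice_to]
  have h2 : (PySem.Str.slice w2 (some (-1)) none).toList = w2.toList.drop (w2.toList.length - 1) := by
    simp [PySem.List.slice_from_neg_one]
  constructor
  · intro h
    have := congrArg String.toList h
    rw [h1, h2] at this
    rcases hl1 : w1.toList with _ | ⟨a, t1⟩ <;>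
      rcases hl2 : (w2.toList).eq_nil_or_concat with h2' | ⟨t2, b, h2'⟩ <;>
      simp [hl1, h2'] at this ⊢ <;>
      simp_all [PySem.List.pyGet?, PySem.List.pyIdx?]
  · intro h
    rw [← String.toList_inj, h1, h2]
    rcases hl1 : w1.toList with _ | ⟨a, t1⟩ <;>
      rcases hl2 : (w2.toList).eq_nil_or_concat with h2' | ⟨t2, b, h2'⟩ <;>
      simp_all [PySem.List.pyGet?, PySem.List.pyIdx?]

-- the two bodies agree for each word1, so the two outer loops agree
theorem InARow_eq_alt (wordlist : List String) (box : List String) :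
    InARow wordlist box = InARow_alt wordlist box := by
  unfold InARow InARow_alt
  congr 1
  funext pairs word1
  rw [innerA_eq, innerB_eq, bucket_eq, List.filter_filter]
  congr 1
  apply congrArg
  apply List.filter_congr
  intro word2 _
  have hk := slice_key_iff word1 word2
  by_cases h1 : word1 = word2
  · simp [h1]
  · by_cases h2 : PySem.Str.pyGet? word1 0 = PySem.Str.pyGet? word2 (-1)
    · have hs : PySem.Str.slice word2 (some (-1)) none = PySem.Str.slice word1 none (some 1) :=
        (hk.mpr h2).symm
      have h2' : PySem.List.pyGet? word1.toList 0 = PySem.List.pyGet? word2.toList (-1) := by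
        simpa using h2
      simp [h1, Ne.symm h1, h2', hs]
    · have hs : PySem.Str.slice word2 (some (-1)) none ≠ PySem.Str.slice word1 none (some 1) :=
        fun e => h2 (hk.mp e.symm)
      have h2' : ¬ PySem.List.pyGet? word1.toList 0 = PySem.List.pyGet? word2.toList (-1) := by
        simpa using h2
      have hsb : (PySem.Str.slice word2 (some (-1)) none == PySem.Str.slice word1 none (some 1)) = false :=
        beq_eq_false_iff_ne.mpr hs
      have h2b : (PySem.List.pyGet? word1.toList 0 == PySem.List.pyGet? word2.toList (-1)) = false :=
        beq_eq_false_iff_ne.mpr h2'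
      simp [hsb, h2b]

-- ===== VERDICT (by name: the statement is the Claim_ definition above) =====
theorem InARow_spec : Claim_equal_InARow := by
  intro wordlist box _ _
  unfold Spec_InARow
  exact InARow_eq_alt wordlist box
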